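-- pv_equiv track=rewrite | github.com/aniket-aggarwal/IIPP | Data_ext.py | count_number_pairs
-- ===== SOURCE A (Python) =====
-- def count_number_pairs(string):
--     stack = []  # Initialize stack
--     pair_count = 0  # Initialize count for number pairs
--
--     # Iterate through the characters in the string
--     for char in string:
--         if char.isdigit():
--             if stack and stack[-1] == char:
--                 stack.pop()  # Remove top digit from stack
--                 pair_count += 1  # Increment count for number pairs
--             else:
--                 stack.append(char)  # Append current digit to stack
--
--     return pair_count
-- ===== SOURCE B (Python) =====
-- def count_number_pairs(string):
--     seq = [c for c in string if c.isdigit()]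
--     count = 0
--     while True:
--         for i in range(len(seq) - 1):
--             if seq[i] == seq[i + 1]:
--                 del seq[i + 1]
--                 del seq[i]
--                 count += 1
--                 break
--         else:
--             return count
-- ===== Notes on version B (the rewrite author's own statement) =====
-- stated objective: alternative
-- what changed: Replaces the single-pass stack with an order-independent repeated-removal algorithm: filter the digits once, then repeatedly delete the first adjacent equal pair until none remains, counting deletions; confluence of adjacent-pair cancellation makes the counts equal.
import Mathlib
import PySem

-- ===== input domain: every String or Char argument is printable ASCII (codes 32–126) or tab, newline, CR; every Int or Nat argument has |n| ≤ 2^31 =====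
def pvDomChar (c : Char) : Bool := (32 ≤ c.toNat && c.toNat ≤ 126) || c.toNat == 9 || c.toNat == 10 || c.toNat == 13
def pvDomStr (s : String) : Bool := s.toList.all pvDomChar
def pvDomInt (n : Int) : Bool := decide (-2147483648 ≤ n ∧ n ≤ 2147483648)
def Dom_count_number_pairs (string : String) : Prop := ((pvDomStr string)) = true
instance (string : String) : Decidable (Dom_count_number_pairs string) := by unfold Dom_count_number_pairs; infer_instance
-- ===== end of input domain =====

-- B replaces A's single-pass stack with repeated deletion of the first adjacent equal
-- digit pair (an order-independent cancellation algorithm); objective: alternative.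

-- ===== PORT A =====
-- A's stack is a Python list used only at its end (append/[-1]/pop);
-- it is represented here with the top at the HEAD of the list.
def aStep : (List Char × Int) → Char → (List Char × Int) :=
  fun sc c =>
    if PySem.Chars.isdigit c then
      match sc.1 with
      | top :: rest => if top == c then (rest, sc.2 + 1) else (c :: sc.1, sc.2)
      | [] => ([c], sc.2)
    else sc

def count_number_pairs (string : String) : Int :=
  (string.toList.foldl aStep ([], 0)).2

-- ===== PORT B =====
-- Source B's inner for-loop: find the first index i with seq[i] == seq[i+1] and delete
-- both elements; none if no adjacent equal pair exists.
def removeFirstPair : List Char → Option (List Char)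
  | a :: b :: rest =>
      if a == b then some rest
      else (removeFirstPair (b :: rest)).map (a :: ·)
  | _ => none

theorem removeFirstPair_length : ∀ {l s : List Char}, removeFirstPair l = some s → s.length < l.length := by
  intro l
  induction l with
  | nil => intro s h; simp [removeFirstPair] at h
  | cons a t ih =>
    intro s h
    match t, h with
    | [], h => simp [removeFirstPair] at h
    | b :: r, h =>
      by_cases hab : a == b
      · simp [removeFirstPair, hab] at h
        subst h; simp
      · simp [removeFirstPair, hab] at h
        obtain ⟨s', hs', rfl⟩ := h
        have := ih hs'
        simpa using Nat.succ_lt_succ this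

-- Source B's outer while-loop, counting removals
def bLoop (seq : List Char) (count : Int) : Int :=
  match h : removeFirstPair seq with
  | some s => bLoop s (count + 1)
  | none => count
termination_by seq.length
decreasing_by exact removeFirstPair_length h

def count_number_pairs_alt (string : String) : Int :=
  bLoop (string.toList.filter PySem.Chars.isdigit) 0

-- ===== PRECONDITION & SPEC =====
def Spec_count_number_pairs (string : String) (out : Int) : Prop := out = count_number_pairs_alt string
instance (string : String) (out : Int) : Decidable (Spec_count_number_pairs string out) := by unfold Spec_count_number_pairs; infer_instance

-- ===== CLAIM (what is proved, stated in full; the proofs are below) =====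
def Claim_equal_count_number_pairs : Prop := ∀ (string : String), Dom_count_number_pairs string → Spec_count_number_pairs string (count_number_pairs string)

-- ===== LEMMAS AND PROOFS =====

-- the pure stack machine on a digit-only list: final stack and number of pops
def redF : List Char → List Char → List Char
  | st, [] => st
  | b :: t, a :: l => if b == a then redF t l else redF (a :: b :: t) l
  | [], a :: l => redF [a] l

def cntF : List Char → List Char → Nat
  | _, [] => 0
  | b :: t, a :: l => if b == a then cntF t l + 1 else cntF (a :: b :: t) l
  | [], a :: l => cntF [a] l

-- A's fold equals the stack machine on the filtered digits
theorem foldA_eq : ∀ (l : List Char) (st : List Char) (c : Int),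
    List.foldl aStep (st, c) l
      = (redF st (l.filter PySem.Chars.isdigit),
         c + (cntF st (l.filter PySem.Chars.isdigit) : Int)) := by
  intro l
  induction l with
  | nil => intro st c; simp [redF, cntF]
  | cons a l ih =>
    intro st c
    by_cases hd : PySem.Chars.isdigit a
    · match st with
      | [] => simp [hd, aStep, redF, cntF, ih]
      | b :: t =>
        by_cases hb : b == a
        · simp [hd, aStep, hb, redF, cntF, ih]
          ring
        · simp [hd, aStep, hb, redF, cntF, ih]
    · simp [hd, aStep, ih]

-- length invariant: every pop removes exactly two characters
theorem length_inv : ∀ (l st : List Char),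
    2 * cntF st l + (redF st l).length = st.length + l.length := by
  intro l
  induction l with
  | nil => intro st; simp [redF, cntF]
  | cons a l ih =>
    intro st
    match st with
    | [] => have := ih [a]; simp [redF, cntF]; simp at this; omega
    | b :: t =>
      by_cases hb : b == a
      · have := ih t; simp [redF, cntF, hb]; simp at this; omega
      · have := ih (a :: b :: t); simp [redF, cntF, hb]; simp at this; omega

-- cancellation: deleting an adjacent equal pair does not change the final stack
theorem redF_cancel : ∀ (x : List Char) (st : List Char) (a : Char) (y : List Char),
    List.IsChain (· ≠ ·) st →
    redF st (x ++ a :: a :: y) = redF st (x ++ y) := by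
  intro x
  induction x with
  | nil =>
    intro st a y hst
    match st with
    | [] => simp [redF]
    | b :: t =>
      by_cases hb : b == a
      · have hba : b = a := by simpa using hb
        subst hba
        match t with
        | [] => simp [redF]
        | c :: u =>
          have hcb : b ≠ c := hst.rel_head
          have hca : ¬ (c == b) = true := by simp; intro h; exact hcb h.symm
          simp [redF, hca]
      · simp [redF, hb]
  | cons c x ih =>
    intro st a y hst
    match st with
    | [] =>
      simp only [List.cons_append, redF]
      exact ih [c] a y (List.isChain_singleton c)
    | b :: t =>
      by_cases hb : b == c
      · simp only [List.cons_append, redF, hb, if_pos]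
        exact ih t a y hst.tail
      · simp only [List.cons_append, redF, hb, Bool.false_eq_true, if_neg, not_false_eq_true]
        refine ih (c :: b :: t) a y (List.isChain_cons_cons.mpr ⟨?_, hst⟩)
        intro h; exact hb (by simp [h])

-- on an input list that (together with the reversed stack) is irreducible, no pops happen
theorem cntF_irr : ∀ (l st : List Char),
    List.IsChain (· ≠ ·) (st.reverse ++ l) → cntF st l = 0 := by
  intro l
  induction l with
  | nil => intro st _; simp [cntF]
  | cons a l ih =>
    intro st h
    match st with
    | [] => exact ih [a] (by simpa using h)
    | b :: t =>
      have hba : b ≠ a := by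
        rcases List.isChain_append.mp h with ⟨_, _, h3⟩
        exact h3 b (by simp) a (by simp)
      have hb : ¬ (b == a) = true := by simp [hba]
      simp only [cntF, hb, Bool.false_eq_true, if_neg, not_false_eq_true]
      refine ih (a :: b :: t) ?_
      simpa using h

-- no adjacent pair found ⇒ the list is irreducible
theorem removeFirstPair_none : ∀ {l : List Char},
    removeFirstPair l = none → List.IsChain (· ≠ ·) l := by
  intro l
  induction l with
  | nil => intro _; exact List.isChain_nil
  | cons a t ih =>
    intro h
    match t with
    | [] => exact List.isChain_singleton a
    | b :: r =>
      by_cases hab : a == b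
      · simp [removeFirstPair, hab] at h
      · simp [removeFirstPair, hab] at h
        refine List.isChain_cons_cons.mpr ⟨by simpa using hab, ih ?_⟩
        cases hr : removeFirstPair (b :: r) with
        | none => rfl
        | some s => simp [hr] at h

-- a found pair splits the list as x ++ a :: a :: y with result x ++ y
theorem removeFirstPair_some : ∀ {l s : List Char},
    removeFirstPair l = some s → ∃ x a y, l = x ++ a :: a :: y ∧ s = x ++ y := by
  intro l
  induction l with
  | nil => intro s h; simp [removeFirstPair] at h
  | cons a t ih =>
    intro s h
    match t with
    | [] => simp [removeFirstPair] at h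
    | b :: r =>
      by_cases hab : a == b
      · have hab' : a = b := by simpa using hab
        simp [removeFirstPair, hab] at h
        exact ⟨[], a, r, by simp [hab', h.symm]⟩
      · simp [removeFirstPair, hab] at h
        obtain ⟨s', hs', rfl⟩ := h
        obtain ⟨x, d, y, hl, hs⟩ := ih hs'
        exact ⟨a :: x, d, y, by simp [hl], by simp [hs]⟩

-- one removal step decrements the pop count of the stack machine
theorem cntF_step {l s : List Char} (h : removeFirstPair l = some s) :
    cntF [] l = cntF [] s + 1 := by
  obtain ⟨x, a, y, rfl, rfl⟩ := removeFirstPair_some h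
  have hred : redF [] (x ++ a :: a :: y) = redF [] (x ++ y) :=
    redF_cancel x [] a y List.isChain_nil
  have h1 := length_inv (x ++ a :: a :: y) []
  have h2 := length_inv (x ++ y) []
  rw [hred] at h1
  simp at h1 h2
  omega

-- B's loop computes count + cntF [] seq
theorem bLoop_eq : ∀ (seq : List Char) (count : Int),
    bLoop seq count = count + (cntF [] seq : Int) := by
  intro seq count
  induction seq, count using bLoop.induct with
  | case1 seq count s h ih =>
    rw [bLoop]
    split
    · rename_i s' h'
      rw [h'] at h
      injection h with h; subst h
      rw [ih, cntF_step h']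
      push_cast; ring
    · rename_i h'
      rw [h'] at h; exact absurd h (by simp)
  | case2 seq count h =>
    rw [bLoop]
    split
    · rename_i s' h'
      rw [h'] at h; exact absurd h (by simp)
    · have : cntF [] seq = 0 := cntF_irr seq [] (by simpa using removeFirstPair_none h)
      simp [this]

-- ===== VERDICT (by name: the statement is the Claim_ definition above) =====
theorem count_number_pairs_spec : Claim_equal_count_number_pairs := by
  intro string _
  unfold Spec_count_number_pairs count_number_pairs count_number_pairs_alt
  rw [foldA_eq, bLoop_eq]
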